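-- pv_equiv track=rewrite | github.com/ConorOBrien-Foxx/Confiture | confiture.py | split_around
-- ===== SOURCE A (Python) =====
-- def split_around(array, needle):
-- 	chunk = []
-- 	window = len(needle)
-- 	index = 0
-- 	while index < len(array):
-- 		if array[index : index + window] == needle:
-- 			yield chunk
-- 			chunk = []
-- 			index += window
-- 		else:
-- 			chunk.append(array[index])
-- 			index += 1
-- 	yield chunk
-- ===== SOURCE B (Python) =====
-- def split_around(array, needle):
--     m = len(needle)
--     if m == 0:
--         raise ValueError("empty needle")
--     n = len(array)
--     occs = [i for i in range(n - m + 1) if array[i:i + m] == needle]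
--     out = []
--     prev = 0
--     for s in occs:
--         if s >= prev:
--             out.append(array[prev:s])
--             prev = s + m
--     out.append(array[prev:])
--     return out
-- ===== Notes on version B (the rewrite author's own statement) =====
-- stated objective: alternative
-- what changed: B first computes the sorted list of all needle occurrence positions (testing only the n-m+1 positions where the needle fits), then greedily selects non-overlapping ones and emits chunks as slices, instead of A's single streaming loop that slice-compares at every index and grows each chunk element by element.
-- outside the precondition, e.g. on split_around([], []): A returns [[]], B raises ValueError
import Mathlib
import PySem

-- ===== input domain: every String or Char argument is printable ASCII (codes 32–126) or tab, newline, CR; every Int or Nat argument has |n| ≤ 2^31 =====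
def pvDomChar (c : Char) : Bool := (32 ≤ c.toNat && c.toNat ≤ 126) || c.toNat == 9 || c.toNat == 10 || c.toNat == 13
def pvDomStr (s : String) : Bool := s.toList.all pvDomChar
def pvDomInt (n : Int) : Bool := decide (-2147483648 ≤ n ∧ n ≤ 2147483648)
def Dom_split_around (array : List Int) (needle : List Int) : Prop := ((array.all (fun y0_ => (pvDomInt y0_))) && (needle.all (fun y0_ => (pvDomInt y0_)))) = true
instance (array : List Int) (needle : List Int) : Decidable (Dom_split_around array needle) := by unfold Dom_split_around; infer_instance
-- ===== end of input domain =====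

-- B computes the occurrence positions first, then greedily selects non-overlapping ones and slices out
-- the chunks, instead of A's single streaming loop growing each chunk element by element (objective: alternative).


-- ===== PORT A =====
-- A's while-loop; index and chunk are the loop state.  'max needle.length 1' is a totality guard only:
-- under Pre_ (needle ≠ []) it equals needle.length, Python's 'index += window'.  (On needle = [] the
-- Python generator never terminates for a nonempty array, which Pre_ excludes.)
def splitAroundGo (array : List Int) (needle : List Int) (chunk : List Int) (index : Nat) : List (List Int) :=
  if _h : index < array.length then
    if PySem.List.slice array (some (index : Int)) (some ((index : Int) + (needle.length : Int))) = needle then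
      chunk :: splitAroundGo array needle [] (index + max needle.length 1)
    else
      splitAroundGo array needle (chunk ++ [array[index]]) (index + 1)
  else [chunk]
termination_by array.length - index
decreasing_by
  · have : 1 ≤ max needle.length 1 := le_max_right _ _
    omega
  · omega

def split_around (array : List Int) (needle : List Int) : List (List Int) :=
  splitAroundGo array needle [] 0

-- ===== PORT B =====
-- Source B: occurrence list by comprehension, then a greedy fold taking non-overlapping occurrences.
-- (Python's range(n - m + 1) equals List.range (n + 1 - m): both are empty when m > n.)
def split_around_alt (array : List Int) (needle : List Int) : List (List Int) :=
  let m := needle.length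
  let n := array.length
  let occs := (List.range (n + 1 - m)).filter
      (fun (i : Nat) => PySem.List.slice array (some (i : Int)) (some ((i : Int) + (m : Int))) = needle)
  let st := occs.foldl
      (fun (st : List (List Int) × Nat) (s : Nat) =>
        if st.2 ≤ s then
          (st.1 ++ [PySem.List.slice array (some (st.2 : Int)) (some (s : Int))], s + m)
        else st)
      ([], 0)
  st.1 ++ [PySem.List.slice array (some (st.2 : Int)) none]

-- ===== PRECONDITION & SPEC =====
-- Pre_ excludes the empty needle, on which the Python A diverges for every nonempty array (the window-0
-- match advances the index by 0) and returns [[]] only for the empty array; B raises ValueError there.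
def Pre_split_around (array : List Int) (needle : List Int) : Prop := needle ≠ []
instance (array : List Int) (needle : List Int) : Decidable (Pre_split_around array needle) := by unfold Pre_split_around; infer_instance
def pvWitness_split_around : List Int × List Int := ([1, 2, 3, 2, 3, 4], [2, 3])

def Spec_split_around (array : List Int) (needle : List Int) (out : List (List Int)) : Prop := out = split_around_alt array needle
instance (array : List Int) (needle : List Int) (out : List (List Int)) : Decidable (Spec_split_around array needle out) := by unfold Spec_split_around; infer_instance

-- ===== CLAIM (what is proved, stated in full; the proofs are below) =====
def Claim_equal_split_around : Prop := ∀ (array : List Int) (needle : List Int), Dom_split_around array needle → Pre_split_around array needle → Spec_split_around array needle (split_around array needle)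

-- ===== LEMMAS AND PROOFS =====

-- the least occurrence position ≥ i (naive scan; terminates also for nd = [] since i stays bounded)
def nextOcc (a : List Int) (nd : List Int) (i : Nat) : Option Nat :=
  if i + nd.length ≤ a.length then
    if (a.drop i).take nd.length = nd then some i else nextOcc a nd (i + 1)
  else none
termination_by a.length + 1 - i
decreasing_by omega

lemma nextOcc_some {a nd : List Int} {i s : Nat} (h : nextOcc a nd i = some s) :
    i ≤ s ∧ s + nd.length ≤ a.length ∧ (a.drop s).take nd.length = nd := by
  induction i using nextOcc.induct a nd with
  | case1 i hle hocc =>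
      rw [nextOcc, if_pos hle, if_pos hocc] at h
      cases h; exact ⟨le_refl _, hle, hocc⟩
  | case2 i hle hocc ih =>
      rw [nextOcc, if_pos hle, if_neg hocc] at h
      obtain ⟨h1, h2, h3⟩ := ih h
      exact ⟨by omega, h2, h3⟩
  | case3 i hle =>
      rw [nextOcc, if_neg hle] at h
      cases h

lemma nextOcc_eq_some {a nd : List Int} {i s : Nat}
    (h1 : i ≤ s) (h2 : s + nd.length ≤ a.length) (h3 : (a.drop s).take nd.length = nd)
    (h4 : ∀ t, i ≤ t → t < s → ¬ ((a.drop t).take nd.length = nd)) :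
    nextOcc a nd i = some s := by
  induction hd : s - i generalizing i with
  | zero =>
      have : i = s := by omega
      subst this
      rw [nextOcc, if_pos (by omega), if_pos h3]
  | succ k ih =>
      have hlt : i < s := by omega
      rw [nextOcc, if_pos (by omega), if_neg (h4 i (le_refl _) hlt)]
      exact ih (by omega) (fun t ht => h4 t (by omega)) (by omega)

lemma nextOcc_eq_none {a nd : List Int} {i : Nat}
    (h : ∀ t, i ≤ t → t + nd.length ≤ a.length → ¬ ((a.drop t).take nd.length = nd)) :
    nextOcc a nd i = none := by
  induction i using nextOcc.induct a nd with
  | case1 i hle hocc => exact absurd hocc (h i (le_refl _) hle)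
  | case2 i hle hocc ih =>
      rw [nextOcc, if_pos hle, if_neg hocc]
      exact ih (fun t ht => h t (by omega))
  | case3 i hle => rw [nextOcc, if_neg hle]

lemma nextOcc_succ {a nd : List Int} {i : Nat}
    (h : ¬ ((a.drop i).take nd.length = nd)) : nextOcc a nd i = nextOcc a nd (i + 1) := by
  by_cases hle : i + nd.length ≤ a.length
  · rw [nextOcc, if_pos hle, if_neg h]
  · rw [nextOcc, if_neg hle, nextOcc, if_neg (by omega)]

-- the list of chunks produced from position i on ('max nd.length 1' is a totality guard as in the port)
def chunksFrom (a : List Int) (nd : List Int) (i : Nat) : List (List Int) :=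
  match h : nextOcc a nd i with
  | some s => ((a.drop i).take (s - i)) :: chunksFrom a nd (s + max nd.length 1)
  | none => [a.drop i]
termination_by a.length + 1 - i
decreasing_by
  obtain ⟨h1, h2, -⟩ := nextOcc_some h
  have : 1 ≤ max nd.length 1 := le_max_right _ _
  omega

lemma chunksFrom_eq_some {a nd : List Int} {i s : Nat} (h : nextOcc a nd i = some s) :
    chunksFrom a nd i = ((a.drop i).take (s - i)) :: chunksFrom a nd (s + max nd.length 1) := by
  conv_lhs => unfold chunksFrom
  rw [h]

lemma chunksFrom_eq_none {a nd : List Int} {i : Nat} (h : nextOcc a nd i = none) :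
    chunksFrom a nd i = [a.drop i] := by
  conv_lhs => unfold chunksFrom
  rw [h]

lemma chunksFrom_ne_nil (a nd : List Int) (i : Nat) : chunksFrom a nd i ≠ [] := by
  cases h : nextOcc a nd i with
  | some s => rw [chunksFrom_eq_some h]; simp
  | none => rw [chunksFrom_eq_none h]; simp

-- if a match succeeds at i ≤ n then the needle fits: i + m ≤ n
lemma occ_fits {a nd : List Int} {i : Nat} (hi : i ≤ a.length)
    (h : (a.drop i).take nd.length = nd) : i + nd.length ≤ a.length := by
  have := congrArg List.length h
  simp only [List.length_take, List.length_drop] at this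
  omega

-- a chunk reaching past i starts with a[i]
lemma take_drop_cons {a : List Int} {i j : Nat} (hi : i < a.length) (hj : i < j) :
    (a.drop i).take (j - i) = a[i] :: (a.drop (i + 1)).take (j - (i + 1)) := by
  rw [List.drop_eq_getElem_cons hi]
  have : j - i = (j - (i + 1)) + 1 := by omega
  rw [this, List.take_succ_cons]

-- ===== A-side characterisation =====
lemma splitAroundGo_eq (a nd : List Int) (hm : nd ≠ []) :
    ∀ k i chunk, a.length - i ≤ k →
      splitAroundGo a nd chunk i =
        (match chunksFrom a nd i with
         | [] => [chunk]
         | h :: t => (chunk ++ h) :: t) := by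
  have hm1 : 1 ≤ nd.length := by cases nd <;> simp_all
  intro k
  induction k with
  | zero =>
      intro i chunk hk
      have hi : ¬ i < a.length := by omega
      rw [splitAroundGo, dif_neg hi,
        chunksFrom_eq_none (nextOcc_eq_none (fun t ht hfit h => by omega))]
      simp [List.drop_eq_nil_of_le (by omega : a.length ≤ i)]
  | succ k ih =>
      intro i chunk hk
      by_cases hi : i < a.length
      · rw [splitAroundGo, dif_pos hi, PySem.List.slice_natCast_add]
        by_cases hocc : (a.drop i).take nd.length = nd
        · rw [if_pos hocc]
          have hfit := occ_fits (by omega) hocc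
          have hnext : nextOcc a nd i = some i :=
            nextOcc_eq_some (le_refl _) hfit hocc (fun t ht htl => by omega)
          have hmax : max nd.length 1 = nd.length := by omega
          rw [chunksFrom_eq_some hnext, ih (i + max nd.length 1) [] (by omega)]
          rcases hcf : chunksFrom a nd (i + max nd.length 1) with _ | ⟨h, t⟩
          · exact absurd hcf (chunksFrom_ne_nil a nd _)
          · simp
        · rw [if_neg hocc, ih (i + 1) (chunk ++ [a[i]]) (by omega)]
          rcases hcf : nextOcc a nd (i + 1) with _ | s
          · have hni : nextOcc a nd i = none := by rw [nextOcc_succ hocc]; exact hcf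
            rw [chunksFrom_eq_none hni, chunksFrom_eq_none hcf, List.drop_eq_getElem_cons hi]
            simp
          · have hsi : nextOcc a nd i = some s := by rw [nextOcc_succ hocc]; exact hcf
            rw [chunksFrom_eq_some hsi, chunksFrom_eq_some hcf]
            have hs := (nextOcc_some hcf).1
            rw [take_drop_cons hi (by omega)]
            simp
      · rw [splitAroundGo, dif_neg hi,
          chunksFrom_eq_none (nextOcc_eq_none (fun t ht hfit h => by omega))]
        simp [List.drop_eq_nil_of_le (by omega : a.length ≤ i)]

-- ===== B-side characterisation of the greedy fold =====
lemma greedy_eq (a nd : List Int) (hm : nd ≠ []) :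
    ∀ (l : List Nat) (out : List (List Int)) (i : Nat),
      l.Pairwise (· < ·) →
      (∀ x ∈ l, x + nd.length ≤ a.length ∧ (a.drop x).take nd.length = nd) →
      (∀ x, x + nd.length ≤ a.length → (a.drop x).take nd.length = nd → i ≤ x → x ∈ l) →
      (l.foldl
          (fun (st : List (List Int) × Nat) (s : Nat) =>
            if st.2 ≤ s then
              (st.1 ++ [PySem.List.slice a (some (st.2 : Int)) (some (s : Int))], s + nd.length)
            else st)
          (out, i)).1 ++
        [a.drop (l.foldl
          (fun (st : List (List Int) × Nat) (s : Nat) =>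
            if st.2 ≤ s then
              (st.1 ++ [PySem.List.slice a (some (st.2 : Int)) (some (s : Int))], s + nd.length)
            else st)
          (out, i)).2] = out ++ chunksFrom a nd i := by
  have hm1 : 1 ≤ nd.length := by cases nd <;> simp_all
  intro l
  induction l with
  | nil =>
      intro out i _ _ hall
      rw [chunksFrom_eq_none (nextOcc_eq_none (fun t ht hfit h =>
        absurd (hall t hfit h ht) (List.not_mem_nil)))]
      simp
  | cons s t ih =>
      intro out i hpw hmem hall
      have hs := hmem s List.mem_cons_self
      by_cases his : i ≤ s
      · simp only [List.foldl_cons, if_pos his]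
        have hnext : nextOcc a nd i = some s := by
          refine nextOcc_eq_some his hs.1 hs.2 (fun t' ht' htl hocc => ?_)
          rcases List.mem_cons.mp (hall t' (occ_fits (by omega) hocc) hocc ht') with rfl | hmem'
          · omega
          · have := (List.pairwise_cons.mp hpw).1 t' hmem'
            omega
        have hmax : max nd.length 1 = nd.length := by omega
        rw [chunksFrom_eq_some hnext, hmax,
          ih (out ++ [PySem.List.slice a (some (i : Int)) (some (s : Int))]) (s + nd.length)
            (List.pairwise_cons.mp hpw).2
            (fun x hx => hmem x (List.mem_cons_of_mem _ hx))
            (fun x hfit hocc hx => by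
              rcases List.mem_cons.mp (hall x hfit hocc (by omega)) with rfl | hmem'
              · omega
              · exact hmem'),
          PySem.List.slice_natCast]
        simp
      · simp only [List.foldl_cons, if_neg his]
        exact ih out i (List.pairwise_cons.mp hpw).2
          (fun x hx => hmem x (List.mem_cons_of_mem _ hx))
          (fun x hfit hocc hx => by
            rcases List.mem_cons.mp (hall x hfit hocc hx) with rfl | hmem'
            · omega
            · exact hmem')

-- ===== VERDICT (by name: the statement is the Claim_ definition above) =====
theorem split_around_spec : Claim_equal_split_around := by
  intro a nd _ hpre
  unfold Spec_split_around split_around split_around_alt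
  dsimp only
  have hm1 : 1 ≤ nd.length := by cases nd <;> simp_all [Pre_split_around]
  rw [splitAroundGo_eq a nd hpre a.length 0 [] (by omega)]
  have hfilter :
      ∀ x, x ∈ (List.range (a.length + 1 - nd.length)).filter
        (fun (i : Nat) => PySem.List.slice a (some (i : Int)) (some ((i : Int) + (nd.length : Int))) = nd) ↔
        x + nd.length ≤ a.length ∧ (a.drop x).take nd.length = nd := by
    intro x
    simp only [List.mem_filter, List.mem_range, PySem.List.slice_natCast_add, decide_eq_true_eq]
    constructor
    · rintro ⟨h1, h2⟩; exact ⟨by omega, h2⟩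
    · rintro ⟨h1, h2⟩; exact ⟨by omega, h2⟩
  have hpw : ((List.range (a.length + 1 - nd.length)).filter
      (fun (i : Nat) => PySem.List.slice a (some (i : Int)) (some ((i : Int) + (nd.length : Int))) = nd)).Pairwise (· < ·) :=
    List.Pairwise.sublist List.filter_sublist List.pairwise_lt_range
  have hg := greedy_eq a nd hpre _ [] 0 hpw
    (fun x hx => (hfilter x).mp hx)
    (fun x hfit hocc _ => (hfilter x).mpr ⟨hfit, hocc⟩)
  simp only [List.nil_append] at hg
  rw [PySem.List.slice_from_natCast, hg]
  rcases hcf : chunksFrom a nd 0 with _ | ⟨h, t⟩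
  · exact absurd hcf (chunksFrom_ne_nil a nd 0)
  · simp
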